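-- pv_equiv track=rewrite | github.com/BhuviiPillai/6.-real-time-data-quality-validation-for-streaming-data---9e9c3c2b | utils.py | get_sensor_groups
-- ===== SOURCE A (Python) =====
-- from typing import Dict, List, Any, Optional, Union
--
-- def get_sensor_groups(data: List[Dict[str, Any]]) -> Dict[str, List[Dict[str, Any]]]:
--     """Group data points by sensor ID."""
--     groups = {}
--     for item in data:
--         sensor_id = item.get("sensor_id")
--         if sensor_id:
--             if sensor_id not in groups:
--                 groups[sensor_id] = []
--             groups[sensor_id].append(item)
--     return groups
-- ===== SOURCE B (Python) =====
-- def get_sensor_groups(data):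
--     """Group data points by sensor ID."""
--     keys = []
--     for item in data:
--         sensor_id = item.get("sensor_id")
--         if sensor_id and sensor_id not in keys:
--             keys.append(sensor_id)
--     return {k: [item for item in data if item.get("sensor_id") == k] for k in keys}
-- ===== Notes on version B (the rewrite author's own statement) =====
-- stated objective: alternative
-- what changed: Replaces the single-pass hash-accumulation (create-bucket-then-append per item) by a two-phase approach: one pass collects the distinct truthy sensor ids in first-occurrence order, then the result is built as a comprehension that filters the whole data list once per key.
import Mathlib
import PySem

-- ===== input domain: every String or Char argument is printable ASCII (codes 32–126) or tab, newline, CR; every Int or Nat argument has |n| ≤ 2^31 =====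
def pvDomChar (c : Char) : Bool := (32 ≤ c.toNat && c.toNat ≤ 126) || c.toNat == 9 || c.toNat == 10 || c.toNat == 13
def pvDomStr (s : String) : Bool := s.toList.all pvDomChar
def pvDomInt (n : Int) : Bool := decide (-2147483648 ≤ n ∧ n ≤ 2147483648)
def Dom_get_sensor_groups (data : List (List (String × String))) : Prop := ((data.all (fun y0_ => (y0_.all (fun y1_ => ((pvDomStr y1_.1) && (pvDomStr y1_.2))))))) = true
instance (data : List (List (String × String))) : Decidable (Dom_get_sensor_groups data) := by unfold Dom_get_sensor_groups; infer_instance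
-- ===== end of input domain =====

-- B replaces A's single-pass dict accumulation by a two-phase build (collect the distinct truthy
-- sensor ids in first-occurrence order, then one filter of the data per key); alternative, not faster.


-- ===== PORT A =====
-- item.get("sensor_id"): first-match lookup in the item's association list (dict semantics)
def sensorId? (item : List (String × String)) : Option String :=
  (PySem.Dict.mk item).get? "sensor_id"

def get_sensor_groups (data : List (List (String × String))) : List (String × List (List (String × String))) :=
  (data.foldl (fun (groups : PySem.Dict String (List (List (String × String)))) item =>
      match sensorId? item with
      | some sensor_id =>
          if sensor_id ≠ "" then            -- `if sensor_id:` truthiness of a string = non-empty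
            -- `if sensor_id not in groups: groups[sensor_id] = []` then `groups[sensor_id].append(item)`
            let g := if groups.contains sensor_id then groups else groups.insert sensor_id []
            g.modify sensor_id [] (· ++ [item])
          else groups
      | none => groups) PySem.Dict.empty).items

-- ===== PORT B =====
def get_sensor_groups_alt (data : List (List (String × String))) : List (String × List (List (String × String))) :=
  let keys := data.foldl (fun (ks : List String) item =>
      match sensorId? item with
      | some sensor_id =>
          if sensor_id ≠ "" ∧ sensor_id ∉ ks then ks ++ [sensor_id] else ks
      | none => ks) []
  keys.map (fun k => (k, data.filter (fun item => sensorId? item == some k)))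

-- ===== PRECONDITION & SPEC =====
def Spec_get_sensor_groups (data : List (List (String × String))) (out : List (String × List (List (String × String)))) : Prop := out = get_sensor_groups_alt data
instance (data : List (List (String × String))) (out : List (String × List (List (String × String)))) : Decidable (Spec_get_sensor_groups data out) := by unfold Spec_get_sensor_groups; infer_instance

-- ===== CLAIM (what is proved, stated in full; the proofs are below) =====
def Claim_equal_get_sensor_groups : Prop := ∀ (data : List (List (String × String))), Dom_get_sensor_groups data → Spec_get_sensor_groups data (get_sensor_groups data)

-- ===== LEMMAS AND PROOFS =====

-- the (key, item) pairs of the items with a truthy sensor id, in order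
def pvKeyed (data : List (List (String × String))) : List (String × List (String × String)) :=
  data.filterMap (fun item =>
    match sensorId? item with
    | some s => if s ≠ "" then some (s, item) else none
    | none => none)

-- ensure-bucket-then-append collapses to a single modify
lemma modify_absorb (d : PySem.Dict String (List (List (String × String)))) (k : String)
    (f : List (List (String × String)) → List (List (String × String))) :
    (if d.contains k then d else d.insert k []).modify k [] f = d.modify k [] f := by
  by_cases h : d.contains k
  · simp [h]
  · simp only [h, Bool.false_eq_true, if_false]
    simp [PySem.Dict.modify, PySem.Dict.getD_insert_self, PySem.Dict.insert_insert_self,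
      PySem.Dict.getD_of_not_contains d [] (by simpa using h)]

-- A's loop is the modify-fold over the keyed sublist
lemma portA_fold_eq (data : List (List (String × String))) :
    (data.foldl (fun (groups : PySem.Dict String (List (List (String × String)))) item =>
      match sensorId? item with
      | some sensor_id =>
          if sensor_id ≠ "" then
            let g := if groups.contains sensor_id then groups else groups.insert sensor_id []
            g.modify sensor_id [] (· ++ [item])
          else groups
      | none => groups) PySem.Dict.empty)
    = (pvKeyed data).foldl (fun d p => d.modify p.1 [] (· ++ [p.2])) PySem.Dict.empty := by
  rw [pvKeyed, List.foldl_filterMap]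
  apply List.foldl_ext
  intro d item _
  cases h : sensorId? item with
  | none => simp
  | some s =>
    by_cases hs : s = ""
    · simp [hs]
    · simp only [hs, ne_eq, not_false_eq_true, if_true]
      exact modify_absorb d s _

-- B's key loop is the Set.add-fold over the keyed sublist
lemma portB_keys_eq (data : List (List (String × String))) :
    (data.foldl (fun (ks : List String) item =>
      match sensorId? item with
      | some sensor_id =>
          if sensor_id ≠ "" ∧ sensor_id ∉ ks then ks ++ [sensor_id] else ks
      | none => ks) [])
    = PySem.Set.ofList ((pvKeyed data).map (·.1)) := by
  rw [← PySem.Set.update_nil_left, PySem.Set.update_map_eq_foldl_add, pvKeyed,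
    List.foldl_filterMap]
  apply List.foldl_ext
  intro ks item _
  cases h : sensorId? item with
  | none => simp
  | some s =>
    by_cases hs : s = ""
    · simp [hs]
    · by_cases hm : s ∈ ks <;>
        simp [hs, hm, PySem.Set.add, PySem.Set.contains]

-- per-key: the keyed-and-filtered items are exactly the data filter, for a truthy key
lemma filter_keyed (k : String) (hk : k ≠ "") (data : List (List (String × String))) :
    ((pvKeyed data).filter (fun p => p.1 == k)).map (·.2)
      = data.filter (fun item => sensorId? item == some k) := by
  induction data with
  | nil => simp [pvKeyed]
  | cons x rest ih =>
    simp only [pvKeyed] at ih ⊢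
    simp only [ne_eq, ite_not] at ih ⊢
    rw [List.filterMap_cons]
    cases h : sensorId? x with
    | none => simp [h, ih]
    | some s =>
      by_cases hs : s = ""
      · simp [h, hs, ih, Ne.symm hk]
      · by_cases hsk : s = k
        · subst hsk
          simp [h, hs, ih]
        · have hf : (s == k) = false := by simp [hsk]
          simp [h, hs, hf, ih]

lemma mem_keyed_ne (data : List (List (String × String))) (k : String)
    (hmem : k ∈ (pvKeyed data).map (·.1)) : k ≠ "" := by
  rcases List.mem_map.mp hmem with ⟨p, hp, hpk⟩
  rcases List.mem_filterMap.mp hp with ⟨item, _, hitem⟩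
  cases h : sensorId? item with
  | none => simp [h] at hitem
  | some s =>
    by_cases hs : s = ""
    · simp [h, hs] at hitem
    · simp only [h, hs, ne_eq, not_false_eq_true, if_true, Option.some.injEq] at hitem
      rw [← hpk, ← hitem]
      exact hs

theorem get_sensor_groups_spec : Claim_equal_get_sensor_groups := by
  intro data _
  unfold Spec_get_sensor_groups get_sensor_groups get_sensor_groups_alt
  rw [portA_fold_eq, portB_keys_eq]
  set F := pvKeyed data with hF
  set G := F.foldl (fun d p => d.modify p.1 [] (· ++ [p.2])) PySem.Dict.empty with hG
  have hkeys : G.keys = PySem.Set.ofList (F.map (·.1)) := by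
    rw [hG, PySem.Dict.keys_foldl_modify_key F Prod.fst [] (fun _ p v => v ++ [p.2]),
      PySem.Dict.keys_empty, PySem.Set.update_nil_left]
  have hnodup : G.keys.Nodup := by
    rw [hG]
    exact PySem.Dict.nodup_keys_foldl_modify_key F Prod.fst [] (fun _ p v => v ++ [p.2])
      PySem.Dict.empty (by simp [PySem.Dict.keys_empty])
  rw [PySem.Dict.items_eq_map_keys G hnodup [], hkeys]
  apply List.map_congr_left
  intro k hkmem
  have hk : k ≠ "" := mem_keyed_ne data k ((PySem.Set.mem_ofList _ _).mp hkmem)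
  have hget : G.getD k [] = (F.filter (fun p => p.1 == k)).map (·.2) := by
    rw [hG, PySem.Dict.getD_foldl_modify_append F PySem.Dict.empty k]
    simp [PySem.Dict.getD_empty]
  rw [hget, hF, filter_keyed k hk data]
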